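-- pv_equiv track=rewrite | github.com/Abhi001vj/coding-interview-preparation | leetcode_discussion_google/distinct islands with and without rotation/mirrors.py | count_distinct_islands_with_rotation
-- ===== SOURCE A (Python) =====
-- def get_island_shape(grid, row, col, visited):
--     if (row < 0 or row >= len(grid) or
--         col < 0 or col >= len(grid[0]) or
--         grid[row][col] == 0 or
--         (row, col) in visited):
--         return []
--
--     visited.add((row, col))
--     # Key change: Store coordinates relative to start point
--     shape = [(0, 0)]  # Starting point becomes origin
--
--     directions = [(-1, 0), (1, 0), (0, -1), (0, 1)]
--     for dx, dy in directions:
--         new_row, new_col = row + dx, col + dy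
--         # Convert child coordinates to relative position
--         child_points = get_island_shape(grid, new_row, new_col, visited)
--         for child_r, child_c in child_points:
--             shape.append((child_r + dx, child_c + dy))
--
--     return shape
--
-- def normalize_shape(points):
--     def get_rotations(x, y):
--         # All 8 possible transformations (4 rotations × 2 reflections)
--         return [
--             (x, y),   # original
--             (-x, y),  # flip horizontal
--             (x, -y),  # flip vertical
--             (-x, -y), # both flips
--             (y, x),   # 90° rotation and variants
--             (-y, x),
--             (y, -x),
--             (-y, -x)
--         ]
--
--     canonical = None
--     # Try all transformations
--     for i in range(8):
--         transformed = []
--         for x, y in points: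
--             transformed.append(get_rotations(x, y)[i])
--
--         # Normalize to origin
--         if transformed:
--             min_x = min(x for x, _ in transformed)
--             min_y = min(y for _, y in transformed)
--             normalized = [(x - min_x, y - min_y) for x, y in transformed]
--             normalized.sort()
--
--             if canonical is None or tuple(normalized) < canonical:
--                 canonical = tuple(normalized)
--
--     return canonical
--
-- def count_distinct_islands_with_rotation(grid):
--     if not grid or not grid[0]:
--         return 0
--
--     rows, cols = len(grid), len(grid[0])
--     visited = set()
--     distinct_shapes = set()
--
--     for r in range(rows):
--         for c in range(cols):
--             if grid[r][c] == 1 and (r, c) not in visited: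
--                 shape = get_island_shape(grid, r, c, visited)
--                 # Normalize shape considering rotations
--                 canonical_shape = normalize_shape(shape)
--                 distinct_shapes.add(canonical_shape)
--
--     return len(distinct_shapes)
-- ===== SOURCE B (Python) =====
-- def canonical_form(points):
--     # min over the 8 dihedral transforms of the sorted, origin-anchored offset list
--     if not points:
--         return None
--     candidates = []
--     for t in (lambda x, y: (x, y), lambda x, y: (-x, y),
--               lambda x, y: (x, -y), lambda x, y: (-x, -y),
--               lambda x, y: (y, x), lambda x, y: (-y, x),
--               lambda x, y: (y, -x), lambda x, y: (-y, -x)):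
--         pts = [t(x, y) for x, y in points]
--         mx = min(x for x, _ in pts)
--         my = min(y for _, y in pts)
--         candidates.append(tuple(sorted((x - mx, y - my) for x, y in pts)))
--     return min(candidates)
--
-- def count_distinct_islands_with_rotation(grid):
--     if not grid or not grid[0]:
--         return 0
--     rows, cols = len(grid), len(grid[0])
--     visited = set()
--     shapes = set()
--     for r in range(rows):
--         for c in range(cols):
--             if grid[r][c] == 1 and (r, c) not in visited:
--                 # iterative flood fill with an explicit stack, collecting absolute cells
--                 cells = []
--                 stack = [(r, c)]
--                 while stack:
--                     row, col = stack.pop()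
--                     if (row < 0 or row >= rows or col < 0 or col >= cols
--                             or grid[row][col] == 0 or (row, col) in visited):
--                         continue
--                     visited.add((row, col))
--                     cells.append((row, col))
--                     stack.extend([(row, col + 1), (row, col - 1),
--                                   (row + 1, col), (row - 1, col)])
--                 shapes.add(canonical_form([(x - r, y - c) for x, y in cells]))
--     return len(shapes)
-- ===== Notes on version B (the rewrite author's own statement) =====
-- stated objective: alternative
-- what changed: B replaces A's recursive get_island_shape, which builds each shape by chaining per-direction offset translations through nested recursive calls, with an iterative explicit-stack flood fill that collects absolute cell coordinates and subtracts the seed once; the 8-transform canonicalization becomes min() over a precomputed candidate list instead of A's None-seeded running best.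
-- outside the precondition, e.g. on count_distinct_islands_with_rotation([[1, 1], [1]]): A raises IndexError, B raises IndexError
import Mathlib
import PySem

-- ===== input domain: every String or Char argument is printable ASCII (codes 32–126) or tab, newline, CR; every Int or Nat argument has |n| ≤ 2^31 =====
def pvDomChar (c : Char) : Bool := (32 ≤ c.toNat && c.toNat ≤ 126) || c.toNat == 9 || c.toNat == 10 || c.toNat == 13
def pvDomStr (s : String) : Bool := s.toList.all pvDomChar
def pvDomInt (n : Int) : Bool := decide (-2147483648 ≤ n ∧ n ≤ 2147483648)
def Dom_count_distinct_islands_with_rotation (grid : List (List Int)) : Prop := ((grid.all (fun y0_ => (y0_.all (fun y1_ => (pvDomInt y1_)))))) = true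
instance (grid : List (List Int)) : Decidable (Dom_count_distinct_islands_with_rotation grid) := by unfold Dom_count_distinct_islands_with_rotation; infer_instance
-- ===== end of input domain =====

-- B replaces A's recursive, offset-chaining island DFS by an iterative explicit-stack flood
-- fill over absolute cells, and the running-best 8-transform canonicalization by a min() over
-- the precomputed list of the 8 candidates (objective: alternative decomposition).

-- ===== PORT A =====
-- grid[row][col]; both Pythons only evaluate it after the bounds guards, so the default is
-- never the returned value on inputs satisfying Pre_ (exact there).
def pvCell (grid : List (List Int)) (row col : Int) : Int :=
  PySem.List.pyGetD (PySem.List.pyGetD grid row []) col 0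

-- the identical blocking guard both Pythons spell out:
-- row < 0 or row >= len(grid) or col < 0 or col >= len(grid[0]) or grid[row][col] == 0 or (row,col) in visited
def pvBlocked (grid : List (List Int)) (row col : Int) (visited : PySem.Set (Int × Int)) : Bool :=
  decide (row < 0) || decide ((grid.length : Int) ≤ row) ||
  decide (col < 0) || decide (((grid.headD []).length : Int) ≤ col) ||
  (pvCell grid row col == 0) || PySem.Set.contains visited (row, col)

-- Python tuple comparison on (int, int)
def pvPairLt (a b : Int × Int) : Bool :=
  decide (a.1 < b.1) || (decide (a.1 = b.1) && decide (a.2 < b.2))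

-- Python tuple/list lexicographic comparison on sequences of int pairs (hand-ported, exact)
def pvListLt : List (Int × Int) → List (Int × Int) → Bool
  | _, [] => false
  | [], _ :: _ => true
  | a :: s, b :: t => if pvPairLt a b then true else if a = b then pvListLt s t else false

-- get_island_shape: recursion on fuel (none = fuel exhausted, proved unreachable at the
-- fuel the port passes); the Python for-loop over the 4 directions is the foldl, threading
-- (shape, visited) exactly as the Python mutates them
def pvDfs (grid : List (List Int)) :
    Nat → Int → Int → PySem.Set (Int × Int) → Option (List (Int × Int) × PySem.Set (Int × Int))
  | 0, _, _, _ => none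
  | Nat.succ f, row, col, visited =>
    if pvBlocked grid row col visited then some ([], visited)
    else
      [((-1 : Int), (0 : Int)), (1, 0), (0, -1), (0, 1)].foldl
        (fun st d =>
          match st with
          | none => none
          | some (shape, vis) =>
            match pvDfs grid f (row + d.1) (col + d.2) vis with
            | none => none
            | some (cp, vis') =>
              some (shape ++ cp.map (fun q => (q.1 + d.1, q.2 + d.2)), vis'))
        (some ([((0 : Int), (0 : Int))], PySem.Set.add visited (row, col)))

-- get_rotations(x, y)
def pvRotations (x y : Int) : List (Int × Int) :=
  [(x, y), (-x, y), (x, -y), (-x, -y), (y, x), (-y, x), (y, -x), (-y, -x)]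

-- 'if canonical is None or tuple(normalized) < canonical: canonical = tuple(normalized)'
def pvUpd (canonical : Option (List (Int × Int))) (normalized : List (Int × Int)) :
    Option (List (Int × Int)) :=
  match canonical with
  | none => some normalized
  | some c => if pvListLt normalized c then some normalized else canonical

-- normalize_shape: running best over i in range(8); min() on the nonempty int list is exact
-- via min?.getD; normalized.sort() on pairs is sorted2 (Python sorts tuples lexicographically)
def pvNormalize (points : List (Int × Int)) : Option (List (Int × Int)) :=
  (PySem.List.pyRange 0 8 1).foldl
    (fun canonical i =>
      let transformed := points.map (fun p => (PySem.List.pyGet? (pvRotations p.1 p.2) i).getD (0, 0))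
      if transformed = [] then canonical
      else
        let mx := (PySem.List.min? (transformed.map Prod.fst) (fun x => x)).getD 0
        let my := (PySem.List.min? (transformed.map Prod.snd) (fun x => x)).getD 0
        let normalized := PySem.List.sorted2 (transformed.map (fun p => (p.1 - mx, p.2 - my)))
          Prod.fst Prod.snd false
        pvUpd canonical normalized)
    none

-- body of A's inner loop over c (the two nested for-loops of the Python)
def pvBodyA (grid : List (List Int))
    (r : Int) (st : PySem.Set (Option (List (Int × Int))) × PySem.Set (Int × Int)) (c : Int) :
    PySem.Set (Option (List (Int × Int))) × PySem.Set (Int × Int) :=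
  if pvCell grid r c = 1 ∧ (r, c) ∉ st.2 then
    match pvDfs grid (grid.length * (grid.headD []).length + 1) r c st.2 with
    | none => st
    | some (shape, v') => (PySem.Set.add st.1 (pvNormalize shape), v')
  else st

def count_distinct_islands_with_rotation (grid : List (List Int)) : Int :=
  if grid = [] ∨ grid.headD [] = [] then 0
  else
    (((PySem.List.pyRange 0 (grid.length : Int) 1).foldl
        (fun st r => (PySem.List.pyRange 0 (((grid.headD []).length : Int)) 1).foldl (pvBodyA grid r) st)
        (PySem.Set.empty, PySem.Set.empty)).1.length : Int)

-- ===== PORT B =====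
-- iterative flood fill: explicit stack (head = top; Python appends/pops at the end, so the
-- four extended neighbours pop in the order (row-1,col), (row+1,col), (row,col-1), (row,col+1)),
-- collecting the absolute coordinates of the newly visited cells
def pvFill (grid : List (List Int)) :
    Nat → PySem.Set (Int × Int) → List (Int × Int) → List (Int × Int) →
    Option (List (Int × Int) × PySem.Set (Int × Int))
  | 0, _, _, _ => none
  | Nat.succ f, visited, stack, cells =>
    match stack with
    | [] => some (cells, visited)
    | (row, col) :: rest =>
      if pvBlocked grid row col visited then pvFill grid f visited rest cells
      else
        pvFill grid f (PySem.Set.add visited (row, col))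
          ((row - 1, col) :: (row + 1, col) :: (row, col - 1) :: (row, col + 1) :: rest)
          (cells ++ [(row, col)])

-- the 8 dihedral transforms, in the same order as A's table
def pvTransforms : List ((Int × Int) → (Int × Int)) :=
  [fun p => (p.1, p.2), fun p => (-p.1, p.2), fun p => (p.1, -p.2), fun p => (-p.1, -p.2),
   fun p => (p.2, p.1), fun p => (-p.2, p.1), fun p => (p.2, -p.1), fun p => (-p.2, -p.1)]

-- canonical_form: build all 8 candidates, then take min(); Python's min on lists of int
-- pairs (lexicographic, first minimum) is hand-ported as the running-first-min fold
def pvCanonicalForm (points : List (Int × Int)) : Option (List (Int × Int)) :=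
  if points = [] then none
  else
    let candidates := pvTransforms.map (fun t =>
      let pts := points.map t
      let mx := (PySem.List.min? (pts.map Prod.fst) (fun x => x)).getD 0
      let my := (PySem.List.min? (pts.map Prod.snd) (fun x => x)).getD 0
      PySem.List.sorted2 (pts.map (fun p => (p.1 - mx, p.2 - my))) Prod.fst Prod.snd false)
    match candidates with
    | [] => none
    | c :: rest => some (rest.foldl (fun best x => if pvListLt x best then x else best) c)

-- body of B's inner loop over c
def pvBodyB (grid : List (List Int))
    (r : Int) (st : PySem.Set (Option (List (Int × Int))) × PySem.Set (Int × Int)) (c : Int) :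
    PySem.Set (Option (List (Int × Int))) × PySem.Set (Int × Int) :=
  if pvCell grid r c = 1 ∧ (r, c) ∉ st.2 then
    match pvFill grid (4 * (grid.length * (grid.headD []).length) + 2) st.2 [(r, c)] [] with
    | none => st
    | some (cells, v') =>
      (PySem.Set.add st.1 (pvCanonicalForm (cells.map (fun p => (p.1 - r, p.2 - c)))), v')
  else st

def count_distinct_islands_with_rotation_alt (grid : List (List Int)) : Int :=
  if grid = [] ∨ grid.headD [] = [] then 0
  else
    (((PySem.List.pyRange 0 (grid.length : Int) 1).foldl
        (fun st r => (PySem.List.pyRange 0 (((grid.headD []).length : Int)) 1).foldl (pvBodyB grid r) st)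
        (PySem.Set.empty, PySem.Set.empty)).1.length : Int)

-- ===== PRECONDITION & SPEC =====
-- Pre_ excludes exactly the ragged grids on which the Python raises IndexError: a row shorter
-- than the first row is indexed at a column past its end by the r,c scan (B raises there too).
def Pre_count_distinct_islands_with_rotation (grid : List (List Int)) : Prop :=
  ∀ row ∈ grid, (grid.headD []).length ≤ row.length
instance (grid : List (List Int)) : Decidable (Pre_count_distinct_islands_with_rotation grid) := by
  unfold Pre_count_distinct_islands_with_rotation; infer_instance

def pvWitness_count_distinct_islands_with_rotation : List (List Int) := [[1, 0], [0, 1]]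

def Spec_count_distinct_islands_with_rotation (grid : List (List Int)) (out : Int) : Prop := out = count_distinct_islands_with_rotation_alt grid
instance (grid : List (List Int)) (out : Int) : Decidable (Spec_count_distinct_islands_with_rotation grid out) := by unfold Spec_count_distinct_islands_with_rotation; infer_instance

-- ===== CLAIM (what is proved, stated in full; the proofs are below) =====
def Claim_equal_count_distinct_islands_with_rotation : Prop := ∀ (grid : List (List Int)), Dom_count_distinct_islands_with_rotation grid → Pre_count_distinct_islands_with_rotation grid → Spec_count_distinct_islands_with_rotation grid (count_distinct_islands_with_rotation grid)

-- ===== LEMMAS AND PROOFS =====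

-- in-bounds cells, the invariant on the visited set, and the cell count
def pvInB (grid : List (List Int)) (p : Int × Int) : Prop :=
  0 ≤ p.1 ∧ p.1 < (grid.length : Int) ∧ 0 ≤ p.2 ∧ p.2 < ((grid.headD []).length : Int)

def pvInv (grid : List (List Int)) (v : List (Int × Int)) : Prop :=
  v.Nodup ∧ ∀ p ∈ v, pvInB grid p

def pvN (grid : List (List Int)) : Nat := grid.length * (grid.headD []).length

def pvAllCells (grid : List (List Int)) : List (Int × Int) :=
  (List.range grid.length).flatMap
    (fun (a : Nat) =>
      (List.range (grid.headD []).length).map (fun (b : Nat) => ((a : Int), (b : Int))))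

theorem pvMem_allCells (grid : List (List Int)) (p : Int × Int) :
    p ∈ pvAllCells grid ↔ pvInB grid p := by
  rw [pvAllCells, List.mem_flatMap]
  constructor
  · rintro ⟨a, ha, hp⟩
    rw [List.mem_map] at hp
    obtain ⟨b, hb, rfl⟩ := hp
    rw [List.mem_range] at ha hb
    exact ⟨by simp, by simpa using ha, by simp, by simpa using hb⟩
  · rintro ⟨h1, h2, h3, h4⟩
    refine ⟨p.1.toNat, List.mem_range.mpr (by omega), ?_⟩
    rw [List.mem_map]
    refine ⟨p.2.toNat, List.mem_range.mpr (by omega), ?_⟩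
    simp [Int.toNat_of_nonneg h1, Int.toNat_of_nonneg h3]

theorem pvLength_allCells (grid : List (List Int)) :
    (pvAllCells grid).length = pvN grid := by
  simp [pvAllCells, pvN, List.length_flatMap]

theorem pvCard_lt (grid : List (List Int)) (v : List (Int × Int)) (u : Int × Int)
    (hinv : pvInv grid v) (hu : u ∉ v) (hb : pvInB grid u) : v.length < pvN grid := by
  have hnd : (u :: v).Nodup := List.nodup_cons.mpr ⟨hu, hinv.1⟩
  have hsub : (u :: v) ⊆ pvAllCells grid := by
    intro x hx
    rw [pvMem_allCells]
    rcases List.mem_cons.mp hx with rfl | hxv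
    · exact hb
    · exact hinv.2 x hxv
  have := (hnd.subperm hsub).length_le
  rw [pvLength_allCells] at this
  simp at this
  omega

-- guard analysis: a non-blocked cell is in bounds and unvisited
theorem pvBlocked_false (grid : List (List Int)) (row col : Int) (v : PySem.Set (Int × Int))
    (h : pvBlocked grid row col v = false) : pvInB grid (row, col) ∧ (row, col) ∉ v := by
  simp only [pvBlocked, Bool.or_eq_false_iff, decide_eq_false_iff_not, beq_eq_false_iff_ne,
    not_lt, not_le] at h
  obtain ⟨⟨⟨⟨⟨h1, h2⟩, h3⟩, h4⟩, h5⟩, h6⟩ := h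
  exact ⟨⟨by omega, by omega, by omega, by omega⟩, fun hm => by simp at h6; exact h6 hm⟩

theorem pvInvAdd (grid : List (List Int)) (v : PySem.Set (Int × Int)) (row col : Int)
    (hinv : pvInv grid v) (hb : pvInB grid (row, col)) (hm : (row, col) ∉ v) :
    pvInv grid (v ++ [(row, col)]) := by
  constructor
  · rw [List.nodup_append]
    refine ⟨hinv.1, List.nodup_singleton _, ?_⟩
    intro a ha b hb
    rw [List.mem_singleton] at hb
    subst hb
    exact fun h => hm (h ▸ ha)
  · intro p hp
    rcases List.mem_append.mp hp with hp | hp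
    · exact hinv.2 p hp
    · simp at hp; subst hp; exact hb

-- proof-side absolute-coordinate twin of pvDfs
def pvAdfs (grid : List (List Int)) :
    Nat → Int → Int → PySem.Set (Int × Int) → Option (List (Int × Int) × PySem.Set (Int × Int))
  | 0, _, _, _ => none
  | Nat.succ f, row, col, visited =>
    if pvBlocked grid row col visited then some ([], visited)
    else
      match pvAdfs grid f (row - 1) col (PySem.Set.add visited (row, col)) with
      | none => none
      | some (c1, v2) =>
        match pvAdfs grid f (row + 1) col v2 with
        | none => none
        | some (c2, v3) =>
          match pvAdfs grid f row (col - 1) v3 with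
          | none => none
          | some (c3, v4) =>
            match pvAdfs grid f row (col + 1) v4 with
            | none => none
            | some (c4, v5) => some ((row, col) :: (c1 ++ (c2 ++ (c3 ++ c4))), v5)

-- pvDfs returns pvAdfs's cells translated to offsets from the call cell
theorem pvRel (grid : List (List Int)) (f : Nat) :
    ∀ (row col : Int) (v : PySem.Set (Int × Int)),
      pvDfs grid f row col v =
        (pvAdfs grid f row col v).map
          (fun r => (r.1.map (fun q => (q.1 - row, q.2 - col)), r.2)) := by
  induction f with
  | zero => intro row col v; simp [pvDfs, pvAdfs]
  | succ f ih =>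
    intro row col v
    simp only [pvDfs, pvAdfs]
    cases hbg : pvBlocked grid row col v with
    | true => rw [if_pos (by simp [hbg]), if_pos (by simp [hbg])]; simp
    | false =>
      rw [if_neg (by simp [hbg]), if_neg (by simp [hbg])]
      simp only [List.foldl_cons, List.foldl_nil, ih]
      simp only [show (∀ x : Int, x + -1 = x - 1) from fun _ => by ring, add_zero]
      cases h1 : pvAdfs grid f (row - 1) col (PySem.Set.add v (row, col)) with
      | none => simp [h1]
      | some r1 =>
        obtain ⟨c1, v2⟩ := r1
        simp only [h1, Option.map_some]
        cases h2 : pvAdfs grid f (row + 1) col v2 with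
        | none => simp [h2]
        | some r2 =>
          obtain ⟨c2, v3⟩ := r2
          simp only [h2, Option.map_some]
          cases h3 : pvAdfs grid f row (col - 1) v3 with
          | none => simp [h3]
          | some r3 =>
            obtain ⟨c3, v4⟩ := r3
            simp only [h3, Option.map_some]
            cases h4 : pvAdfs grid f row (col + 1) v4 with
            | none => simp [h4]
            | some r4 =>
              obtain ⟨c4, v5⟩ := r4
              simp only [h4, Option.map_some]
              simp [List.map_map, List.map_append, List.append_assoc, sub_self,
                Prod.ext_iff]
              congr 1
              · exact List.map_congr_left fun q _ => by
                  simp [Function.comp, Prod.ext_iff]; omega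
              congr 1
              · exact List.map_congr_left fun q _ => by
                  simp [Function.comp, Prod.ext_iff]; omega
              congr 1
              · exact List.map_congr_left fun q _ => by
                  simp [Function.comp, Prod.ext_iff]; omega
              · exact List.map_congr_left fun q _ => by
                  simp [Function.comp, Prod.ext_iff]; omega

theorem pvPost (grid : List (List Int)) (f : Nat) :
    ∀ (row col : Int) (v : PySem.Set (Int × Int)) (cs : List (Int × Int))
      (v' : PySem.Set (Int × Int)),
      pvAdfs grid f row col v = some (cs, v') →
      v' = v ++ cs ∧ (pvInv grid v → pvInv grid v') := by
  induction f with
  | zero => intro row col v cs v' h; simp [pvAdfs] at h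
  | succ f ih =>
    intro row col v cs v' h
    simp only [pvAdfs] at h
    split at h
    · rename_i hbg
      simp only [Option.some.injEq, Prod.mk.injEq] at h
      exact ⟨by rw [← h.1, ← h.2]; simp, by rw [← h.2]; exact id⟩
    · rename_i hbg
      have hb2 := pvBlocked_false grid row col v (by simpa using hbg)
      split at h
      · exact absurd h (by simp)
      · rename_i r1 c1 v2 h1
        split at h
        · exact absurd h (by simp)
        · rename_i r2 c2 v3 h2
          split at h
          · exact absurd h (by simp)
          · rename_i r3 c3 v4 h3
            split at h
            · exact absurd h (by simp)
            · rename_i r4 c4 v5 h4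
              obtain ⟨hcs, hv⟩ := (Prod.mk.injEq _ _ _ _).mp (Option.some.inj h)
              subst hcs; subst hv
              have hadd : PySem.Set.add v (row, col) = v ++ [(row, col)] :=
                PySem.Set.add_of_not_mem hb2.2
              obtain ⟨e1, i1⟩ := ih _ _ _ _ _ h1
              obtain ⟨e2, i2⟩ := ih _ _ _ _ _ h2
              obtain ⟨e3, i3⟩ := ih _ _ _ _ _ h3
              obtain ⟨e4, i4⟩ := ih _ _ _ _ _ h4
              constructor
              · subst e4; subst e3; subst e2; subst e1
                simp [hadd]
              · intro hv0
                have hv1 : pvInv grid (PySem.Set.add v (row, col)) := by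
                  rw [hadd]; exact pvInvAdd grid v row col hv0 hb2.1 hb2.2
                exact i4 (i3 (i2 (i1 hv1)))

theorem pvSuffA (grid : List (List Int)) (f : Nat) :
    ∀ (row col : Int) (v : PySem.Set (Int × Int)),
      pvInv grid v → pvN grid - v.length < f →
      (pvAdfs grid f row col v).isSome := by
  induction f with
  | zero => intro row col v hinv hm; omega
  | succ f ih =>
    intro row col v hinv hm
    simp only [pvAdfs]
    cases hbg : pvBlocked grid row col v with
    | true => simp
    | false =>
      rw [if_neg (by simp [hbg])]
      have hb2 := pvBlocked_false grid row col v hbg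
      have hadd : PySem.Set.add v (row, col) = v ++ [(row, col)] :=
        PySem.Set.add_of_not_mem hb2.2
      have hcard : v.length < pvN grid := pvCard_lt grid v (row, col) hinv hb2.2 hb2.1
      have hv1 : pvInv grid (PySem.Set.add v (row, col)) := by
        rw [hadd]; exact pvInvAdd grid v row col hinv hb2.1 hb2.2
      have hl1 : (PySem.Set.add v (row, col)).length = v.length + 1 := by simp [hadd]
      have hs1 := ih (row - 1) col _ hv1 (by omega)
      obtain ⟨⟨c1, v2⟩, h1⟩ := Option.isSome_iff_exists.mp hs1
      obtain ⟨e1, i1⟩ := pvPost grid f _ _ _ _ _ h1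
      have hv2 := i1 hv1
      have hl2 : v2.length = v.length + 1 + c1.length := by subst e1; simp [hl1]
      have hs2 := ih (row + 1) col _ hv2 (by omega)
      obtain ⟨⟨c2, v3⟩, h2⟩ := Option.isSome_iff_exists.mp hs2
      obtain ⟨e2, i2⟩ := pvPost grid f _ _ _ _ _ h2
      have hv3 := i2 hv2
      have hl3 : v3.length = v2.length + c2.length := by subst e2; simp
      have hs3 := ih row (col - 1) _ hv3 (by omega)
      obtain ⟨⟨c3, v4⟩, h3⟩ := Option.isSome_iff_exists.mp hs3
      obtain ⟨e3, i3⟩ := pvPost grid f _ _ _ _ _ h3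
      have hv4 := i3 hv3
      have hl4 : v4.length = v3.length + c3.length := by subst e3; simp
      have hs4 := ih row (col + 1) _ hv4 (by omega)
      obtain ⟨⟨c4, v5⟩, h4⟩ := Option.isSome_iff_exists.mp hs4
      simp [h1, h2, h3, h4]

theorem pvMonoFill (grid : List (List Int)) (f : Nat) :
    ∀ (g : Nat) (v : PySem.Set (Int × Int)) (st acc : List (Int × Int))
      (r : List (Int × Int) × PySem.Set (Int × Int)),
      f ≤ g → pvFill grid f v st acc = some r → pvFill grid g v st acc = some r := by
  induction f with
  | zero => intro g v st acc r hle h; simp [pvFill] at h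
  | succ f ih =>
    intro g v st acc r hle h
    cases g with
    | zero => omega
    | succ g =>
      cases st with
      | nil => simpa [pvFill] using h
      | cons p rest =>
        obtain ⟨row, col⟩ := p
        simp only [pvFill] at h ⊢
        cases hbg : pvBlocked grid row col v <;> simp only [hbg] at h ⊢ <;>
          simp at h ⊢ <;> exact ih g _ _ _ r (by omega) h

theorem pvSuffF (grid : List (List Int)) (f : Nat) :
    ∀ (v : PySem.Set (Int × Int)) (st acc : List (Int × Int)),
      pvInv grid v → 4 * (pvN grid - v.length) + st.length < f →
      (pvFill grid f v st acc).isSome := by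
  induction f with
  | zero => intro v st acc hinv hm; omega
  | succ f ih =>
    intro v st acc hinv hm
    cases st with
    | nil => simp [pvFill]
    | cons p rest =>
      obtain ⟨row, col⟩ := p
      simp only [pvFill]
      cases hbg : pvBlocked grid row col v with
      | true =>
        rw [if_pos (by simp [hbg])]
        exact ih v rest acc hinv (by simp at hm ⊢; omega)
      | false =>
        rw [if_neg (by simp [hbg])]
        have hb2 := pvBlocked_false grid row col v hbg
        have hadd : PySem.Set.add v (row, col) = v ++ [(row, col)] :=
          PySem.Set.add_of_not_mem hb2.2
        have hcard : v.length < pvN grid := pvCard_lt grid v (row, col) hinv hb2.2 hb2.1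
        have hv1 : pvInv grid (PySem.Set.add v (row, col)) := by
          rw [hadd]; exact pvInvAdd grid v row col hinv hb2.1 hb2.2
        have hl1 : (PySem.Set.add v (row, col)).length = v.length + 1 := by simp [hadd]
        apply ih _ _ _ hv1
        simp only [hl1, List.length_cons] at hm ⊢
        omega

-- the simulation: one recursive call of the absolute DFS = the explicit stack processing
-- the seed and everything it pushes, before the rest of the stack
theorem pvSim (grid : List (List Int)) (f : Nat) :
    ∀ (row col : Int) (v : PySem.Set (Int × Int)) (cs : List (Int × Int))
      (v' : PySem.Set (Int × Int)),
      pvAdfs grid f row col v = some (cs, v') →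
      ∀ (rest acc : List (Int × Int)) (g : Nat)
        (out : List (Int × Int) × PySem.Set (Int × Int)),
        pvFill grid g v' rest (acc ++ cs) = some out →
        ∃ h, pvFill grid h v ((row, col) :: rest) acc = some out := by
  induction f with
  | zero => intro row col v cs v' h; simp [pvAdfs] at h
  | succ f ih =>
    intro row col v cs v' h
    simp only [pvAdfs] at h
    split at h
    · rename_i hbg
      simp only [Option.some.injEq, Prod.mk.injEq] at h
      intro rest acc g out hfill
      refine ⟨g + 1, ?_⟩
      simp only [pvFill]
      rw [if_pos (by simpa using hbg)]
      rw [← h.1, List.append_nil, ← h.2] at hfill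
      exact hfill
    · rename_i hbg
      split at h
      · exact absurd h (by simp)
      · rename_i r1 c1 v2 h1
        split at h
        · exact absurd h (by simp)
        · rename_i r2 c2 v3 h2
          split at h
          · exact absurd h (by simp)
          · rename_i r3 c3 v4 h3
            split at h
            · exact absurd h (by simp)
            · rename_i r4 c4 v5 h4
              obtain ⟨hcs, hv⟩ := (Prod.mk.injEq _ _ _ _).mp (Option.some.inj h)
              intro rest acc g out hfill
              rw [← hv] at hfill
              have e : acc ++ cs =
                  ((((acc ++ [(row, col)]) ++ c1) ++ c2) ++ c3) ++ c4 := by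
                rw [← hcs]; simp [List.append_assoc]
              rw [e] at hfill
              obtain ⟨g4, hg4⟩ := ih _ _ _ _ _ h4 rest _ g out hfill
              obtain ⟨g3, hg3⟩ := ih _ _ _ _ _ h3 _ _ g4 out hg4
              obtain ⟨g2, hg2⟩ := ih _ _ _ _ _ h2 _ _ g3 out hg3
              obtain ⟨g1, hg1⟩ := ih _ _ _ _ _ h1 _ _ g2 out hg2
              refine ⟨g1 + 1, ?_⟩
              simp only [pvFill]
              rw [if_neg (by simpa using hbg)]
              exact hg1

-- A's running best (None-seeded) over a list = first minimum of the list
theorem pvFmin (c : List (Int × Int)) (rest : List (List (Int × Int))) :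
    rest.foldl pvUpd (some c)
    = some (rest.foldl (fun best x => if pvListLt x best then x else best) c) := by
  induction rest generalizing c with
  | nil => rfl
  | cons t rest ih =>
    simp only [List.foldl_cons, pvUpd]
    cases hx : pvListLt t c <;> simp [hx, ih]

-- the two canonicalizations agree on every point list
theorem pvNorm (pts : List (Int × Int)) : pvNormalize pts = pvCanonicalForm pts := by
  cases pts with
  | nil => rfl
  | cons p tl =>
    rw [pvNormalize, pvCanonicalForm, if_neg (by simp)]
    rw [show PySem.List.pyRange 0 8 1 = [0, 1, 2, 3, 4, 5, 6, 7] from rfl]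
    rw [show (fun (canonical : Option (List (Int × Int))) (i : Int) =>
          let transformed := (p :: tl).map
            (fun q => (PySem.List.pyGet? (pvRotations q.1 q.2) i).getD (0, 0))
          if transformed = [] then canonical
          else
            let mx := (PySem.List.min? (transformed.map Prod.fst) (fun x => x)).getD 0
            let my := (PySem.List.min? (transformed.map Prod.snd) (fun x => x)).getD 0
            let normalized := PySem.List.sorted2
              (transformed.map (fun q => (q.1 - mx, q.2 - my))) Prod.fst Prod.snd false
            pvUpd canonical normalized)
        = (fun can i => pvUpd can
            (let transformed := (p :: tl).map
              (fun q => (PySem.List.pyGet? (pvRotations q.1 q.2) i).getD (0, 0))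
             let mx := (PySem.List.min? (transformed.map Prod.fst) (fun x => x)).getD 0
             let my := (PySem.List.min? (transformed.map Prod.snd) (fun x => x)).getD 0
             PySem.List.sorted2 (transformed.map (fun q => (q.1 - mx, q.2 - my)))
               Prod.fst Prod.snd false)) from rfl]
    rw [← List.foldl_map
      (f := fun (i : Int) =>
        let transformed := (p :: tl).map
          (fun q => (PySem.List.pyGet? (pvRotations q.1 q.2) i).getD (0, 0))
        let mx := (PySem.List.min? (transformed.map Prod.fst) (fun x => x)).getD 0
        let my := (PySem.List.min? (transformed.map Prod.snd) (fun x => x)).getD 0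
        PySem.List.sorted2 (transformed.map (fun q => (q.1 - mx, q.2 - my)))
          Prod.fst Prod.snd false)
      (g := pvUpd)]
    simp only [List.map_cons, List.map_nil]
    simp only [show ∀ x y : Int, (PySem.List.pyGet? (pvRotations x y) 0).getD (0,0) = (x, y) from fun _ _ => rfl,
      show ∀ x y : Int, (PySem.List.pyGet? (pvRotations x y) 1).getD (0,0) = (-x, y) from fun _ _ => rfl,
      show ∀ x y : Int, (PySem.List.pyGet? (pvRotations x y) 2).getD (0,0) = (x, -y) from fun _ _ => rfl,
      show ∀ x y : Int, (PySem.List.pyGet? (pvRotations x y) 3).getD (0,0) = (-x, -y) from fun _ _ => rfl,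
      show ∀ x y : Int, (PySem.List.pyGet? (pvRotations x y) 4).getD (0,0) = (y, x) from fun _ _ => rfl,
      show ∀ x y : Int, (PySem.List.pyGet? (pvRotations x y) 5).getD (0,0) = (-y, x) from fun _ _ => rfl,
      show ∀ x y : Int, (PySem.List.pyGet? (pvRotations x y) 6).getD (0,0) = (y, -x) from fun _ _ => rfl,
      show ∀ x y : Int, (PySem.List.pyGet? (pvRotations x y) 7).getD (0,0) = (-y, -x) from fun _ _ => rfl]
    simp only [pvTransforms, List.map_cons, List.map_nil]
    rw [List.foldl_cons, show ∀ t, pvUpd none t = some t from fun _ => rfl, pvFmin]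

-- generic: two folds agree when the step functions agree on states satisfying an invariant
theorem pvFoldInv {α σ : Type} (P : σ → Prop) (f g : σ → α → σ)
    (h : ∀ s a, P s → f s a = g s a ∧ P (f s a)) :
    ∀ (l : List α) (s : σ), P s → l.foldl f s = l.foldl g s ∧ P (l.foldl f s) := by
  intro l
  induction l with
  | nil => exact fun s hP => ⟨rfl, hP⟩
  | cons a l ih =>
    intro s hP
    obtain ⟨hfg, hPf⟩ := h s a hP
    simp only [List.foldl_cons]
    rw [hfg] at hPf ⊢
    exact ih (g s a) hPf

theorem pvBodyEq (grid : List (List Int)) (r : Int)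
    (st : PySem.Set (Option (List (Int × Int))) × PySem.Set (Int × Int)) (c : Int)
    (h : pvInv grid st.2) :
    pvBodyA grid r st c = pvBodyB grid r st c ∧ pvInv grid (pvBodyA grid r st c).2 := by
  rw [pvBodyA, pvBodyB]
  by_cases hc : pvCell grid r c = 1 ∧ (r, c) ∉ st.2
  · rw [if_pos hc, if_pos hc]
    have hsA : (pvAdfs grid (grid.length * (grid.headD []).length + 1) r c st.2).isSome :=
      pvSuffA grid _ r c st.2 h (by simp only [pvN]; omega)
    obtain ⟨⟨cells, v'⟩, hA⟩ := Option.isSome_iff_exists.mp hsA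
    have hrel := pvRel grid (grid.length * (grid.headD []).length + 1) r c st.2
    rw [hA] at hrel
    obtain ⟨hv'eq, hinv'⟩ := pvPost grid _ r c st.2 cells v' hA
    have hinvV' := hinv' h
    obtain ⟨g1, hg1⟩ := pvSim grid (grid.length * (grid.headD []).length + 1) r c st.2
      cells v' hA [] [] 1 (cells, v') (by simp [pvFill])
    have hsF : (pvFill grid (4 * (grid.length * (grid.headD []).length) + 2) st.2
        [(r, c)] []).isSome := by
      apply pvSuffF grid _ st.2 [(r, c)] [] h
      simp only [pvN, List.length_cons, List.length_nil]
      omega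
    obtain ⟨outF, hF⟩ := Option.isSome_iff_exists.mp hsF
    have hout : outF = (cells, v') := by
      have h1 := pvMonoFill grid g1 (max g1 (4 * (grid.length * (grid.headD []).length) + 2))
        _ _ _ _ (le_max_left _ _) hg1
      have h2 := pvMonoFill grid _ (max g1 (4 * (grid.length * (grid.headD []).length) + 2))
        _ _ _ _ (le_max_right _ _) hF
      rw [h1] at h2
      exact (Option.some.inj h2).symm
    subst hout
    rw [hrel, hF]
    simp only [Option.map_some]
    exact ⟨by rw [pvNorm], hinvV'⟩
  · rw [if_neg hc, if_neg hc]
    exact ⟨rfl, h⟩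

-- ===== VERDICT (by name: the statement is the Claim_ definition above) =====
theorem count_distinct_islands_with_rotation_spec : Claim_equal_count_distinct_islands_with_rotation := by
  intro grid _ _
  show count_distinct_islands_with_rotation grid = count_distinct_islands_with_rotation_alt grid
  rw [count_distinct_islands_with_rotation, count_distinct_islands_with_rotation_alt]
  by_cases hg : grid = [] ∨ grid.headD [] = []
  · rw [if_pos hg, if_pos hg]
  · rw [if_neg hg, if_neg hg]
    have hinit : pvInv grid ([] : List (Int × Int)) :=
      ⟨List.nodup_nil, fun p hp => by simp at hp⟩
    have main := pvFoldInv (fun st => pvInv grid st.2)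
      (fun st r => (PySem.List.pyRange 0 (((grid.headD []).length : Int)) 1).foldl
        (pvBodyA grid r) st)
      (fun st r => (PySem.List.pyRange 0 (((grid.headD []).length : Int)) 1).foldl
        (pvBodyB grid r) st)
      (fun s r hP => pvFoldInv (fun st => pvInv grid st.2) (pvBodyA grid r) (pvBodyB grid r)
        (fun s2 c hP2 => pvBodyEq grid r s2 c hP2)
        (PySem.List.pyRange 0 (((grid.headD []).length : Int)) 1) s hP)
      (PySem.List.pyRange 0 ((grid.length : Int)) 1)
      (PySem.Set.empty, PySem.Set.empty) hinit
    rw [main.1]
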